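-- pv_equiv track=rewrite | github.com/Romain-Gerard/algo | packcombi.py | partitionne_stirling_rec
-- ===== SOURCE A (Python) =====
-- def partitionne_stirling_rec(lst, k):
--     """
--     Retourne la liste de toutes les partitions de lst en k sous-listes (blocs) en
--     s"inspirant de la définition récursive du nombre de Stirling de seconde espèce:
--
--                         S(n, k) = S(n-1, k-1) + k * S(n-1, k)
--     """
--     n = len(lst)
--
--     # -------------
--     # Cas de base :
--     # -------------
--
--     # Si k = 0 et n = 0, alors on a une seule partition vide.
--     if k == 0 and n == 0:
--         return [[]]
--
--     # Si k = 0 ou n = 0, mais pas les deux en même temps,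
--     # alors il n"existe aucune partition.
--     if (k == 0 or n == 0) and (k != n):
--         return []
--
--     # Si k = n, chaque élément de lst doit être dans son propre bloc.
--     if k == n:
--         return [ [[x] for x in lst] ]
--
--     # Si k = 1, il n"y a qu"un seul bloc contenant tous les éléments.
--     if k == 1:
--         return [[lst]]
--
--     # Si k > n, il n"existe pas de partition car on ne peut
--     # pas répartir n éléments en plus de n blocs non vides.
--     if k > n:
--         return []
--
--     # ----------------------------------------------------
--     # Récurrence :
--     # 1) On met lst[0] dans son propre bloc, et on partitionne
--     #    lst[1:] en (k-1) blocs.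
--     # 2) On met lst[0] dans chacun des blocs d"une partition de
--     #    lst[1:] en k blocs.
--     # ----------------------------------------------------
--
--     # Initialiser la liste de toutes les partitions.
--     lst_part = []
--
--     # 1) Ajouter lst[0] dans un nouveau bloc (S(n-1, k-1))
--     for part in partitionne_stirling_rec(lst[1:], k - 1):
--         # On ajoute le bloc [lst[0]] devant
--         new_part = [[lst[0]]] + part
--         lst_part.append(new_part)
--
--     # 2) Ajouter lst[0] dans chacun des blocs.
--     for part in partitionne_stirling_rec(lst[1:], k):
--         # Pour chaque partition obtenue, on crée k nouvelles partitions
--         # où lst[0] est inséré dans un seul bloc par partition.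
--         for i in range(len(part)):
--             new_part = []
--             for j, bloc in enumerate(part):
--                 if j == i:
--                     # On ajoute lst[0] dans le bloc d"indice i ...
--                     new_part.append([lst[0]] + bloc)
--                 else:
--                     # ... sinon on recopie le bloc.
--                     new_part.append(bloc[:])
--             lst_part.append(new_part)
--
--     return lst_part
-- ===== SOURCE B (Python) =====
-- def _cell(x, suffix, prev, j, m, plo):
--     # partitions of suffix (length m, first element x) into j blocks;
--     # prev = previous row, holding block-counts plo, plo+1, ... for the one-shorter suffix
--     if j == m:
--         return [[[y] for y in suffix]]
--     if j == 1:
--         return [[suffix]]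
--     res = [[[x]] + p for p in prev[j - 1 - plo]]
--     for p in prev[j - plo]:
--         for t in range(len(p)):
--             res.append(p[:t] + [[x] + p[t]] + p[t + 1:])
--     return res
--
--
-- def partitionne_stirling_rec(lst, k):
--     """Bottom-up DP over suffixes: each reachable (suffix length, block count)
--     subproblem is computed once, instead of A's recursion recomputing shared
--     subtrees.  Row m holds the partitions of the length-m suffix into j blocks
--     for every j in the reachable window max(1, k-n+m) .. min(k, m)."""
--     n = len(lst)
--     if k == 0 and n == 0:
--         return [[]]
--     if k <= 0 or n < k:
--         return []
--     row = []
--     for m in range(1, n + 1):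
--         suffix = lst[n - m:]
--         x = suffix[0]
--         row = [_cell(x, suffix, row, j, m, max(1, k - n + m - 1))
--                for j in range(max(1, k - n + m), min(k, m) + 1)]
--     return row[0]  # the last window is just j = k
-- ===== Notes on version B (the rewrite author's own statement) =====
-- stated objective: faster
-- what changed: Replaces A's naive Stirling-style recursion (which recomputes shared (suffix, block-count) subproblems along many call paths) by a bottom-up dynamic program over suffix lengths that computes each reachable subproblem exactly once; intended as faster, measured 1.65x at the largest size both finish (both are bounded below by the exponential output size, so both time out on large outputs).
import Mathlib
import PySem

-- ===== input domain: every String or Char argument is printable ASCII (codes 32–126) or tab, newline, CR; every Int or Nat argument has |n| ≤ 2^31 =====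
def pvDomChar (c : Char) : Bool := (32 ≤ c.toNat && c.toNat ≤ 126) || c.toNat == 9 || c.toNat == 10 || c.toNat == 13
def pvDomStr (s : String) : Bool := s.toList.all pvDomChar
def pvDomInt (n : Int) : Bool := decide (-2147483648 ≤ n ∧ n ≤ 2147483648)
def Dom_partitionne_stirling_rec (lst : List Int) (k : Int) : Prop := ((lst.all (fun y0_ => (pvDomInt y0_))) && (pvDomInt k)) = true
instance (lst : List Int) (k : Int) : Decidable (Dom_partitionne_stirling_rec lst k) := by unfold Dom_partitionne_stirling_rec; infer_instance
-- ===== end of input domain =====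

-- B replaces A's naive recursion by a bottom-up DP over suffixes computing each reachable (suffix, k) subproblem once; intended as faster, measured 1.65x at the largest size both finish.


-- ===== PORT A =====
def partitionne_stirling_rec (lst : List Int) (k : Int) : List (List (List Int)) :=
  let n : Int := lst.length
  if k = 0 ∧ n = 0 then [[]]
  else if (k = 0 ∨ n = 0) ∧ k ≠ n then []
  else if k = n then [lst.map (fun x => [x])]
  else if k = 1 then [[lst]]
  else if n < k then []
  else
    match lst with
    | [] => []  -- unreachable: n = 0 is handled by the first two branches
    | x :: rest =>
      ((partitionne_stirling_rec rest (k - 1)).map (fun part => [x] :: part))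
      ++ ((partitionne_stirling_rec rest k).flatMap (fun part =>
            (PySem.List.pyRange 0 part.length 1).map (fun i =>
              (PySem.List.enumerate part 0).map (fun jb => if jb.1 = i then x :: jb.2 else jb.2))))

-- ===== PORT B =====
-- partitions of `suffix` (length m, head x) into j blocks; `prev` = the previous row,
-- holding block-counts plo, plo+1, … for the one-shorter suffix
def pvCell (x : Int) (suffix : List Int) (prev : List (List (List (List Int)))) (j m plo : Int) :
    List (List (List Int)) :=
  if j = m then [suffix.map (fun y => [y])]
  else if j = 1 then [[suffix]]
  else
    ((PySem.List.pyGetD prev (j - 1 - plo) []).map (fun p => [x] :: p))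
    ++ ((PySem.List.pyGetD prev (j - plo) []).flatMap (fun p =>
          (PySem.List.pyRange 0 p.length 1).map (fun t =>
            PySem.List.slice p none (some t)
              ++ (x :: PySem.List.pyGetD p t []) :: PySem.List.slice p (some (t + 1)) none)))

def partitionne_stirling_rec_alt (lst : List Int) (k : Int) : List (List (List Int)) :=
  let n : Int := lst.length
  if k = 0 ∧ n = 0 then [[]]
  else if k ≤ 0 ∨ n < k then []
  else
    let row := (PySem.List.pyRange 1 (n + 1) 1).foldl
      (fun row m =>
        let suffix := PySem.List.slice lst (some (n - m)) none   -- lst[n-m:]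
        let x := PySem.List.pyGetD suffix 0 0                    -- suffix[0], nonempty since m ≥ 1
        (PySem.List.pyRange (max 1 (k - n + m)) (min k m + 1) 1).map
          (fun j => pvCell x suffix row j m (max 1 (k - n + m - 1))))
      []
    PySem.List.pyGetD row 0 []                                   -- row[0]: the last window is just j = k

-- ===== PRECONDITION & SPEC =====
def Spec_partitionne_stirling_rec (lst : List Int) (k : Int) (out : List (List (List Int))) : Prop := out = partitionne_stirling_rec_alt lst k
instance (lst : List Int) (k : Int) (out : List (List (List Int))) : Decidable (Spec_partitionne_stirling_rec lst k out) := by unfold Spec_partitionne_stirling_rec; infer_instance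

-- ===== CLAIM (what is proved, stated in full; the proofs are below) =====
def Claim_equal_partitionne_stirling_rec : Prop := ∀ (lst : List Int) (k : Int), Dom_partitionne_stirling_rec lst k → Spec_partitionne_stirling_rec lst k (partitionne_stirling_rec lst k)

-- ===== LEMMAS AND PROOFS =====

theorem pvA_neg (lst : List Int) (k : Int) (hk : k < 0) : partitionne_stirling_rec lst k = [] := by
  induction lst generalizing k with
  | nil => simp [partitionne_stirling_rec, show k ≠ 0 from by omega]
  | cons x rest ih =>
      rw [partitionne_stirling_rec]
      rw [if_neg (show ¬(k = 0 ∧ ((x :: rest).length : Int) = 0) from by omega),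
        if_neg (show ¬((k = 0 ∨ ((x :: rest).length : Int) = 0) ∧ k ≠ ((x :: rest).length : Int)) from by
          simp; omega),
        if_neg (show ¬(k = ((x :: rest).length : Int)) from by simp; omega),
        if_neg (show ¬(k = 1) from by omega),
        if_neg (show ¬(((x :: rest).length : Int) < k) from by simp; omega)]
      rw [ih (k-1) (by omega), ih k hk]
      simp

theorem pvEnumSet (x : Int) (p : List (List Int)) (s : Int) (i : Nat) (hi : i < p.length) :
    (PySem.List.enumerate p s).map (fun jb => if jb.1 = s + (i : Int) then x :: jb.2 else jb.2)
    = p.take i ++ (x :: p.getD i []) :: p.drop (i + 1) := by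
  induction p generalizing s i with
  | nil => simp at hi
  | cons a p ih =>
      rw [PySem.List.enumerate_cons]
      cases i with
      | zero =>
          simp only [List.map_cons, Nat.cast_zero, add_zero, List.take_zero,
            List.getD_cons_zero, List.drop_succ_cons, List.drop_zero, List.nil_append]
          congr 1
          rw [List.map_congr_left (g := fun jb => jb.2), PySem.List.map_snd_enumerate]
          intro jb hjb
          rw [PySem.List.mem_enumerate_iff] at hjb
          obtain ⟨kk, hkk, rfl⟩ := hjb
          simp only [ite_eq_right_iff]
          intro h; omega
      | succ i =>
          simp only [List.map_cons, List.take_succ_cons, List.getD_cons_succ, List.drop_succ_cons]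
          rw [if_neg (show ¬((s:Int) = s + ((i+1 : Nat) : Int)) from by push_cast; omega)]
          have hcast : s + ((i + 1 : Nat) : Int) = s + 1 + (i : Int) := by push_cast; ring
          simp only [hcast, List.cons_append]
          rw [ih (s+1) i (by simpa using hi)]

theorem pvInnerEq (x : Int) (p : List (List Int)) (i : Int) (h0 : 0 ≤ i) (h : i < (p.length : Int)) :
    PySem.List.slice p none (some i) ++ (x :: PySem.List.pyGetD p i []) :: PySem.List.slice p (some (i + 1)) none
    = (PySem.List.enumerate p 0).map (fun jb => if jb.1 = i then x :: jb.2 else jb.2) := by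
  obtain ⟨iN, rfl⟩ : ∃ iN : Nat, i = (iN : Int) := ⟨i.toNat, by omega⟩
  have hN : iN < p.length := by exact_mod_cast h
  rw [PySem.List.slice_to_natCast,
    show ((iN : Int) + 1) = ((iN + 1 : Nat) : Int) from by push_cast; ring,
    PySem.List.slice_from_natCast, PySem.List.pyGetD_natCast]
  have := pvEnumSet x p 0 iN hN
  simp only [zero_add] at this
  rw [← this]
theorem pvCellCorrect (x : Int) (rest : List Int) (k j plo : Int)
    (hj1 : 1 ≤ j) (hjk : j ≤ k) (hjm : j ≤ (rest.length : Int) + 1)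
    (hplo2 : 2 ≤ j → plo ≤ j - 1) :
    pvCell x (x :: rest)
      ((PySem.List.pyRange plo (min k (rest.length : Int) + 1) 1).map
        (fun t => partitionne_stirling_rec rest t)) j ((rest.length : Int) + 1) plo
    = partitionne_stirling_rec (x :: rest) j := by
  by_cases hm : j = (rest.length : Int) + 1
  · rw [pvCell, if_pos hm, partitionne_stirling_rec,
      if_neg (show ¬(j = 0 ∧ ((x :: rest).length : Int) = 0) from by omega),
      if_neg (show ¬((j = 0 ∨ ((x :: rest).length : Int) = 0) ∧ j ≠ ((x :: rest).length : Int)) from by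
        simp; omega),
      if_pos (show j = ((x :: rest).length : Int) from by simp; omega)]
  · by_cases h1 : j = 1
    · rw [pvCell, if_neg hm, if_pos h1, partitionne_stirling_rec,
        if_neg (show ¬(j = 0 ∧ ((x :: rest).length : Int) = 0) from by omega),
        if_neg (show ¬((j = 0 ∨ ((x :: rest).length : Int) = 0) ∧ j ≠ ((x :: rest).length : Int)) from by
          simp; omega),
        if_neg (show ¬(j = ((x :: rest).length : Int)) from by simp; omega),
        if_pos h1]
    · have h2 : 2 ≤ j := by omega
      have hjr : j ≤ (rest.length : Int) := by omega
      have hpj : plo ≤ j - 1 := hplo2 h2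
      rw [pvCell, if_neg hm, if_neg h1]
      have e1 : PySem.List.pyGetD
          ((PySem.List.pyRange plo (min k (rest.length : Int) + 1) 1).map
            (fun t => partitionne_stirling_rec rest t)) (j - 1 - plo) []
          = partitionne_stirling_rec rest (j - 1) := by
        rw [show (j - 1 - plo) = (((j - 1 - plo).toNat : Nat) : Int) from by omega,
          PySem.List.pyGetD_map_pyRange_one _ _ _ _ _ (by omega)]
        congr 1
        omega
      have e2 : PySem.List.pyGetD
          ((PySem.List.pyRange plo (min k (rest.length : Int) + 1) 1).map
            (fun t => partitionne_stirling_rec rest t)) (j - plo) []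
          = partitionne_stirling_rec rest j := by
        rw [show (j - plo) = (((j - plo).toNat : Nat) : Int) from by omega,
          PySem.List.pyGetD_map_pyRange_one _ _ _ _ _ (by omega)]
        congr 1
        omega
      rw [e1, e2]
      conv_rhs => rw [partitionne_stirling_rec]
      rw [if_neg (show ¬(j = 0 ∧ ((x :: rest).length : Int) = 0) from by omega),
        if_neg (show ¬((j = 0 ∨ ((x :: rest).length : Int) = 0) ∧ j ≠ ((x :: rest).length : Int)) from by
          simp; omega),
        if_neg (show ¬(j = ((x :: rest).length : Int)) from by simp; omega),
        if_neg h1,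
        if_neg (show ¬(((x :: rest).length : Int) < j) from by simp; omega)]
      congr 1
      apply List.flatMap_congr
      intro p hp
      apply List.map_congr_left
      intro t ht
      rw [PySem.List.mem_pyRange_one] at ht
      exact pvInnerEq x p t ht.1 (by exact_mod_cast ht.2)

theorem pvRowInv (lst : List Int) (k : Int) (hk : 1 ≤ k) (hkn : k ≤ (lst.length : Int))
    (m : Nat) (hm : m ≤ lst.length) :
    (PySem.List.pyRange 1 ((m : Int) + 1) 1).foldl
      (fun row mi =>
        (PySem.List.pyRange (max 1 (k - (lst.length : Int) + mi)) (min k mi + 1) 1).map (fun j =>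
          pvCell (PySem.List.pyGetD (PySem.List.slice lst (some ((lst.length : Int) - mi)) none) 0 0)
            (PySem.List.slice lst (some ((lst.length : Int) - mi)) none) row j mi
            (max 1 (k - (lst.length : Int) + mi - 1))))
      []
    = (PySem.List.pyRange (max 1 (k - (lst.length : Int) + (m : Int))) (min k (m : Int) + 1) 1).map
        (fun j => partitionne_stirling_rec (lst.drop (lst.length - m)) j) := by
  induction m with
  | zero =>
      rw [show ((0:Nat):Int) + 1 = 1 from by norm_num, PySem.List.pyRange_one_eq_nil le_rfl,
        show min k ((0:Nat):Int) = 0 from by omega,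
        show max 1 (k - (lst.length : Int) + ((0:Nat):Int)) = 1 from by omega,
        PySem.List.pyRange_one_eq_nil (by norm_num)]
      simp
  | succ m ih =>
      rw [show ((m+1:Nat):Int) + 1 = ((m:Int)+1) + 1 from by push_cast; ring,
        PySem.List.pyRange_one_succ_right (by omega), List.foldl_append, ih (by omega)]
      simp only [List.foldl_cons, List.foldl_nil]
      have hdrop : PySem.List.slice lst (some ((lst.length : Int) - ((m:Int)+1))) none
          = lst.drop (lst.length - (m+1)) := by
        rw [PySem.List.slice_from lst (by omega)]
        congr 1
        omega
      have hlt : lst.length - (m+1) < lst.length := by omega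
      have hcons : lst.drop (lst.length - (m+1))
          = lst[lst.length - (m+1)] :: lst.drop (lst.length - m) := by
        rw [List.drop_eq_getElem_cons hlt]
        congr 2
        omega
      rw [hdrop, hcons, PySem.List.pyGetD_zero_cons]
      have hrl : (lst.drop (lst.length - m)).length = m := by
        rw [List.length_drop]; omega
      rw [show max 1 (k - (lst.length : Int) + ((m+1 : Nat):Int)) = max 1 (k - (lst.length : Int) + ((m:Int)+1)) from by push_cast; ring_nf,
        show min k ((m+1 : Nat):Int) = min k ((m:Int)+1) from by omega,
        show max 1 (k - (lst.length : Int) + ((m:Int)+1) - 1) = max 1 (k - (lst.length : Int) + (m:Int)) from by omega]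
      apply List.map_congr_left
      intro j hj
      rw [PySem.List.mem_pyRange_one] at hj
      rw [← hcons, hcons]
      have := pvCellCorrect (lst[lst.length - (m+1)]) (lst.drop (lst.length - m)) k j
        (max 1 (k - (lst.length : Int) + (m:Int)))
        (by omega) (by omega) (by rw [hrl]; omega) (fun h2 => by omega)
      rw [hrl] at this
      exact this

-- ===== VERDICT (by name: the statement is the Claim_ definition above) =====
theorem partitionne_stirling_rec_spec : Claim_equal_partitionne_stirling_rec := by
  intro lst k _
  unfold Spec_partitionne_stirling_rec
  rw [partitionne_stirling_rec_alt]
  by_cases hc1 : k = 0 ∧ ((lst.length : Int)) = 0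
  · rw [if_pos hc1, partitionne_stirling_rec.eq_def, if_pos hc1]
  · rw [if_neg hc1]
    by_cases hc2 : k ≤ 0 ∨ ((lst.length : Int)) < k
    · rw [if_pos hc2]
      by_cases hneg : k < 0
      · exact pvA_neg lst k hneg
      · rw [partitionne_stirling_rec.eq_def, if_neg hc1]
        by_cases hk0 : k = 0
        · rw [if_pos (by omega)]
        · have hk1 : 1 ≤ k := by omega
          have hnk : ((lst.length : Int)) < k := by omega
          by_cases hn0 : ((lst.length : Int)) = 0
          · rw [if_pos (by omega)]
          · rw [if_neg (by omega), if_neg (by omega), if_neg (by omega), if_pos hnk]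
    · rw [if_neg hc2]
      have hk1 : 1 ≤ k := by omega
      have hkn : k ≤ ((lst.length : Int)) := by omega
      rw [pvRowInv lst k hk1 hkn lst.length le_rfl]
      rw [show min k ((lst.length : Int)) = k from by omega, Nat.sub_self, List.drop_zero]
      rw [show max 1 (k - (lst.length : Int) + (lst.length : Int)) = k from by omega,
        PySem.List.pyRange_one_singleton]
      simp
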